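-- pv_equiv track=rewrite | github.com/hgbrian/foldism | backends/openfold3.py | _split_paired_a3m
-- ===== SOURCE A (Python) =====
-- def _split_paired_a3m(content: str, num_chains: int) -> list[str]:
--     """Split combined paired A3M into per-chain A3M strings.
--
--     The pair.a3m has chain sections marked by >101, >102, etc.
--     Returns one A3M string per chain.
--     """
--     blocks: dict[int, list[str]] = {i: [] for i in range(num_chains)}
--     current_chain: int | None = None
--
--     for line in content.splitlines():
--         stripped = line.strip()
--         if not stripped or stripped.startswith("#"):
--             continue
--         if stripped.startswith(">"):
--             first_field = stripped[1:].split("\t")[0].strip()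
--             try:
--                 chain_id = int(first_field)
--                 if 101 <= chain_id < 101 + num_chains:
--                     current_chain = chain_id - 101
--                     blocks[current_chain].append(">query")
--                     continue
--             except ValueError:
--                 pass
--             if current_chain is not None:
--                 blocks[current_chain].append(stripped)
--         else:
--             if current_chain is not None:
--                 blocks[current_chain].append(stripped)
--
--     return ["\n".join(blocks.get(i, [])) + "\n" for i in range(num_chains)]
-- ===== SOURCE B (Python) =====
-- def _split_paired_a3m(content: str, num_chains: int) -> list[str]:
--     """Two-phase reimplementation: clean the lines first, then walk marker-delimited
--     segments, instead of a stateful line-by-line dispatch."""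
--     lines = [s for s in (ln.strip() for ln in content.splitlines())
--              if s and not s.startswith("#")]
--
--     def _marker(s: str):
--         if not s.startswith(">"):
--             return None
--         try:
--             cid = int(s[1:].split("\t")[0].strip())
--         except ValueError:
--             return None
--         if 101 <= cid < 101 + num_chains:
--             return cid - 101
--         return None
--
--     blocks: dict[int, list[str]] = {}
--     n = len(lines)
--     i = 0
--     # lines before the first recognized chain marker are ignored
--     while i < n and _marker(lines[i]) is None:
--         i += 1
--     while i < n:
--         c = _marker(lines[i])
--         i += 1
--         seg = [">query"]
--         while i < n and _marker(lines[i]) is None: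
--             seg.append(lines[i])
--             i += 1
--         blocks[c] = blocks.get(c, []) + seg
--     return ["\n".join(blocks.get(i, [])) + "\n" for i in range(num_chains)]
-- ===== Notes on version B (the rewrite author's own statement) =====
-- stated objective: alternative
-- what changed: Replaces A's stateful line-by-line dispatch (a current_chain register consulted at every line, with a pre-built per-chain dict) with a two-phase parse: first clean the lines, then skip to the first chain marker and walk marker-delimited segments, appending each whole segment to its chain's block at once.
import Mathlib
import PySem

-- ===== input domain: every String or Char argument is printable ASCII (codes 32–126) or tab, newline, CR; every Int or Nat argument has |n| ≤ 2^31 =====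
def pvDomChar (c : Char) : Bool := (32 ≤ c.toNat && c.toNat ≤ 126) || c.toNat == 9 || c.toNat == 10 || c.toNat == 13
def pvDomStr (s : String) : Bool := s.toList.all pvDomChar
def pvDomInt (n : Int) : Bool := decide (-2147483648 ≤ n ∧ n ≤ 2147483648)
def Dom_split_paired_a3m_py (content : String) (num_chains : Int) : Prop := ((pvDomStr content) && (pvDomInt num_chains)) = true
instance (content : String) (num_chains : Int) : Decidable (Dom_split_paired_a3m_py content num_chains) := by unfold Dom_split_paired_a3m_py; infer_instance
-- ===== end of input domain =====

-- B replaces A's stateful line-by-line dispatch by a two-phase parse (clean lines, then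
-- walk marker-delimited segments); alternative decomposition, same asymptotic cost.


-- ===== PORT A =====
-- one iteration of A's loop on the already-stripped line ('stripped' in A's body);
-- state = (blocks, current_chain).  'blocks[current_chain].append(x)' is ported as
-- Dict.modify with default [] — the key is always present when current_chain is set
-- (it is pre-inserted by the range loop), so this is Python-exact on reachable states.
def pvStepStrippedA (num_chains : Int)
    (st : PySem.Dict Int (List String) × Option Int) (stripped : String) :
    PySem.Dict Int (List String) × Option Int :=
  if (PySem.Str.len stripped == 0) || PySem.Str.startswith stripped "#" then st
  else if PySem.Str.startswith stripped ">" then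
    let first_field := PySem.Str.strip
      (((PySem.Str.split? (PySem.Str.slice stripped (some 1) none) "\t").getD []).headD "")
    match PySem.Int.ofStr? first_field with
    | some chain_id =>
      if 101 ≤ chain_id ∧ chain_id < 101 + num_chains then
        (st.1.modify (chain_id - 101) [] (· ++ [">query"]), some (chain_id - 101))
      else
        match st.2 with
        | some c => (st.1.modify c [] (· ++ [stripped]), st.2)
        | none => st
    | none =>
      match st.2 with
      | some c => (st.1.modify c [] (· ++ [stripped]), st.2)
      | none => st
  else
    match st.2 with
    | some c => (st.1.modify c [] (· ++ [stripped]), st.2)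
    | none => st

def pvStepA (num_chains : Int)
    (st : PySem.Dict Int (List String) × Option Int) (line : String) :
    PySem.Dict Int (List String) × Option Int :=
  pvStepStrippedA num_chains st (PySem.Str.strip line)

def split_paired_a3m_py (content : String) (num_chains : Int) : List String :=
  let blocks0 := (PySem.List.pyRange 0 num_chains 1).foldl
    (fun d i => d.insert i ([] : List String)) PySem.Dict.empty
  let st := (PySem.Str.splitlines content).foldl (pvStepA num_chains) (blocks0, none)
  (PySem.List.pyRange 0 num_chains 1).map
    (fun i => PySem.Str.join "\n" (st.1.getD i []) ++ "\n")

-- ===== PORT B =====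
-- B's _marker helper: some (cid - 101) iff the stripped line is a recognized chain header.
def pvMarkerB (num_chains : Int) (s : String) : Option Int :=
  if PySem.Str.startswith s ">" then
    match PySem.Int.ofStr? (PySem.Str.strip
        (((PySem.Str.split? (PySem.Str.slice s (some 1) none) "\t").getD []).headD "")) with
    | some cid => if 101 ≤ cid ∧ cid < 101 + num_chains then some (cid - 101) else none
    | none => none
  else none

-- B's first while loop: skip lines before the first recognized marker.
def pvSkipB (num_chains : Int) : List String → List String
  | [] => []
  | l :: ls => if (pvMarkerB num_chains l).isSome then l :: ls else pvSkipB num_chains ls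

-- B's second while loop: consume one marker-delimited segment per iteration.
def pvSegsB (num_chains : Int) (blocks : PySem.Dict Int (List String)) :
    List String → PySem.Dict Int (List String)
  | [] => blocks
  | l :: ls =>
    let c := (pvMarkerB num_chains l).getD 0
    let seg := ">query" :: ls.takeWhile (fun s => (pvMarkerB num_chains s).isNone)
    pvSegsB num_chains (blocks.insert c (blocks.getD c [] ++ seg))
      (ls.dropWhile (fun s => (pvMarkerB num_chains s).isNone))
  termination_by ls => ls.length
  decreasing_by
    simpa using Nat.lt_succ_of_le ((List.dropWhile_sublist _).length_le)

def split_paired_a3m_py_alt (content : String) (num_chains : Int) : List String :=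
  let cleaned := ((PySem.Str.splitlines content).map PySem.Str.strip).filter
    (fun s => (PySem.Str.len s != 0) && !PySem.Str.startswith s "#")
  let blocks := pvSegsB num_chains PySem.Dict.empty (pvSkipB num_chains cleaned)
  (PySem.List.pyRange 0 num_chains 1).map
    (fun i => PySem.Str.join "\n" (blocks.getD i []) ++ "\n")

-- ===== PRECONDITION & SPEC =====
def Spec_split_paired_a3m_py (content : String) (num_chains : Int) (out : List String) : Prop := out = split_paired_a3m_py_alt content num_chains
instance (content : String) (num_chains : Int) (out : List String) : Decidable (Spec_split_paired_a3m_py content num_chains out) := by unfold Spec_split_paired_a3m_py; infer_instance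

-- ===== CLAIM (what is proved, stated in full; the proofs are below) =====
def Claim_equal_split_paired_a3m_py : Prop := ∀ (content : String) (num_chains : Int), Dom_split_paired_a3m_py content num_chains → Spec_split_paired_a3m_py content num_chains (split_paired_a3m_py content num_chains)

-- ===== LEMMAS AND PROOFS =====

-- A's skip condition ('not stripped or stripped.startswith("#")') as a predicate
def pvSkipCond (s : String) : Bool :=
  (PySem.Str.len s == 0) || PySem.Str.startswith s "#"

lemma pvStep_skip {nc : Int} {s : String} (h : pvSkipCond s = true) (st) :
    pvStepStrippedA nc st s = st := by
  unfold pvSkipCond at h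
  simp only [pvStepStrippedA, h, if_true]

-- characterization of one A-step on a kept (non-skipped) line via B's marker
lemma pvStep_char (nc : Int) (s : String) (st : PySem.Dict Int (List String) × Option Int)
    (hk : pvSkipCond s = false) :
    pvStepStrippedA nc st s =
      match pvMarkerB nc s with
      | some c => (st.1.modify c [] (· ++ [">query"]), some c)
      | none =>
        match st.2 with
        | some c => (st.1.modify c [] (· ++ [s]), st.2)
        | none => st := by
  unfold pvSkipCond at hk
  simp only [pvStepStrippedA, pvMarkerB, hk, Bool.false_eq_true, if_false]
  by_cases hs : PySem.Str.startswith s ">" = true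
  · simp only [hs, if_true]
    cases hof : PySem.Int.ofStr? (PySem.Str.strip
        (((PySem.Str.split? (PySem.Str.slice s (some 1) none) "\t").getD []).headD "")) with
    | none => rfl
    | some cid =>
      by_cases hb : 101 ≤ cid ∧ cid < 101 + nc
      · simp only [hb, if_pos, and_self]
      · simp [hb]
  · simp only [hs, if_false, Bool.false_eq_true]

lemma pvStep_none {nc : Int} {s : String} (hm : pvMarkerB nc s = none) (b) :
    pvStepStrippedA nc (b, (none : Option Int)) s = (b, none) := by
  by_cases hk : pvSkipCond s = true
  · exact pvStep_skip hk _
  · rw [pvStep_char nc s _ (by simpa using hk), hm]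

lemma pv_mem_takeWhile {α : Type} (p : α → Bool) (l : List α) (x : α)
    (h : x ∈ l.takeWhile p) : p x = true := by
  induction l with
  | nil => simp [List.takeWhile] at h
  | cons a as ih =>
    rw [List.takeWhile_cons] at h
    by_cases hp : p a = true
    · rw [if_pos hp] at h
      rcases List.mem_cons.mp h with rfl | hm
      · exact hp
      · exact ih hm
    · simp [hp] at h

lemma pv_dropWhile_head {α : Type} (p : α → Bool) (l : List α) (x : α) (xs : List α)
    (h : l.dropWhile p = x :: xs) : p x = false := by
  induction l with
  | nil => simp [List.dropWhile] at h
  | cons a as ih =>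
    rw [List.dropWhile_cons] at h
    by_cases hp : p a = true
    · rw [if_pos hp] at h; exact ih h
    · rw [if_neg hp] at h
      cases h; simpa using hp

lemma pvSkip_eq_dropWhile (nc : Int) (ls : List String) :
    pvSkipB nc ls = ls.dropWhile (fun s => (pvMarkerB nc s).isNone) := by
  induction ls with
  | nil => rfl
  | cons l ls ih =>
    simp only [pvSkipB, List.dropWhile_cons]
    cases h : pvMarkerB nc l with
    | none => simp [ih]
    | some c => simp

lemma pvFold_skip (nc : Int) (ls : List String) (b : PySem.Dict Int (List String)) :
    ls.foldl (pvStepStrippedA nc) (b, none) =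
      (ls.dropWhile (fun s => (pvMarkerB nc s).isNone)).foldl (pvStepStrippedA nc) (b, none) := by
  induction ls with
  | nil => rfl
  | cons l ls ih =>
    rw [List.dropWhile_cons]
    cases h : pvMarkerB nc l with
    | none =>
      simp only [Option.isNone_none, if_true, List.foldl_cons, pvStep_none h b]
      exact ih
    | some c => simp

lemma pvFold_filter (nc : Int) (ls : List String)
    (st : PySem.Dict Int (List String) × Option Int) :
    ls.foldl (pvStepStrippedA nc) st =
      (ls.filter (fun s => !(pvSkipCond s))).foldl (pvStepStrippedA nc) st := by
  induction ls generalizing st with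
  | nil => rfl
  | cons l ls ih =>
    rw [List.filter_cons]
    cases h : pvSkipCond l with
    | true => simp only [Bool.not_true, List.foldl_cons, pvStep_skip h st]
              exact ih st
    | false => simp only [Bool.not_false, if_pos, List.foldl_cons]
               exact ih _

lemma pvFold_seg (nc : Int) (seg : List String) (c : Int)
    (h : ∀ s ∈ seg, pvSkipCond s = false ∧ pvMarkerB nc s = none)
    (b : PySem.Dict Int (List String)) :
    seg.foldl (pvStepStrippedA nc) (b, some c) =
      (seg.foldl (fun b s => b.modify c [] (· ++ [s])) b, some c) := by
  induction seg generalizing b with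
  | nil => rfl
  | cons l ls ih =>
    obtain ⟨hk, hm⟩ := h l (List.mem_cons_self ..)
    rw [List.foldl_cons, pvStep_char nc l _ hk, hm, List.foldl_cons]
    exact ih (fun s hs => h s (List.mem_cons_of_mem _ hs)) _

lemma pvGetD_modify_fold (seg : List String) (c i : Int) (b : PySem.Dict Int (List String)) :
    (seg.foldl (fun b s => b.modify c [] (· ++ [s])) b).getD i [] =
      b.getD i [] ++ (if i = c then seg else []) := by
  have h1 : seg.foldl (fun b s => b.modify c [] (· ++ [s])) b
      = (seg.map (fun s => (c, s))).foldl (fun d p => d.modify p.1 [] (· ++ [p.2])) b := by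
    rw [List.foldl_map]
  rw [h1, PySem.Dict.getD_foldl_modify_append]
  by_cases hic : i = c
  · subst hic; simp [List.filter_map, Function.comp_def]
  · simp [List.filter_map, Function.comp_def, Ne.symm hic, hic]

lemma pvInit_getD (l : List Int) (d : PySem.Dict Int (List String)) (i : Int)
    (h : d.getD i [] = []) :
    (l.foldl (fun d j => d.insert j ([] : List String)) d).getD i [] = [] := by
  induction l generalizing d with
  | nil => exact h
  | cons x xs ih =>
    rw [List.foldl_cons]
    exact ih _ (by rw [PySem.Dict.getD_insert]; split <;> simp [h])

lemma pvMain (nc : Int) : ∀ (n : Nat) (ls : List String), ls.length ≤ n →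
    (∀ s ∈ ls, pvSkipCond s = false) →
    (∀ l, ls.head? = some l → (pvMarkerB nc l).isSome) →
    ∀ (b d : PySem.Dict Int (List String)) (cur : Option Int),
      (∀ i, b.getD i [] = d.getD i []) →
      ∀ i, ((ls.foldl (pvStepStrippedA nc) (b, cur)).1).getD i [] = (pvSegsB nc d ls).getD i [] := by
  intro n
  induction n with
  | zero =>
    intro ls hl _ _ b d cur hbd i
    have hnil : ls = [] := List.eq_nil_of_length_eq_zero (Nat.le_zero.mp hl)
    subst hnil
    simpa [pvSegsB] using hbd i
  | succ n ih =>
    intro ls hl hkeep hhead b d cur hbd i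
    cases ls with
    | nil => simpa [pvSegsB] using hbd i
    | cons l ls' =>
      have hms : (pvMarkerB nc l).isSome := hhead l rfl
      obtain ⟨c, hm⟩ := Option.isSome_iff_exists.mp hms
      have hkl : pvSkipCond l = false := hkeep l (List.mem_cons_self ..)
      have hseg : ∀ s ∈ ls'.takeWhile (fun s => (pvMarkerB nc s).isNone),
          pvSkipCond s = false ∧ pvMarkerB nc s = none := by
        intro s hs
        refine ⟨hkeep s (List.mem_cons_of_mem _ ((List.takeWhile_sublist _).subset hs)), ?_⟩
        have := pv_mem_takeWhile _ _ _ hs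
        simpa [Option.isNone_iff_eq_none] using this
      -- LHS: first step, then the segment, then the rest
      have hLHS : ((l :: ls').foldl (pvStepStrippedA nc) (b, cur)) =
          (ls'.dropWhile (fun s => (pvMarkerB nc s).isNone)).foldl (pvStepStrippedA nc)
            (((">query" :: ls'.takeWhile (fun s => (pvMarkerB nc s).isNone)).foldl
                (fun b s => b.modify c [] (· ++ [s])) b), some c) := by
        rw [List.foldl_cons, pvStep_char nc l _ hkl, hm]
        conv => lhs; rw [← List.takeWhile_append_dropWhile
                (p := fun s => (pvMarkerB nc s).isNone) (l := ls')]
        rw [List.foldl_append, pvFold_seg nc _ c hseg, List.foldl_cons]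
      rw [hLHS]
      -- RHS: one pvSegsB step
      rw [pvSegsB, hm]
      -- apply the induction hypothesis to the rest
      refine ih _ ?_ ?_ ?_ _ _ _ ?_ i
      · have h1 : (ls'.dropWhile (fun s => (pvMarkerB nc s).isNone)).length ≤ ls'.length :=
          (List.dropWhile_sublist _).length_le
        have h2 : ls'.length + 1 ≤ n + 1 := by simpa using hl
        omega
      · intro s hs
        exact hkeep s (List.mem_cons_of_mem _ ((List.dropWhile_sublist _).subset hs))
      · intro x hx
        cases hd : ls'.dropWhile (fun s => (pvMarkerB nc s).isNone) with
        | nil => rw [hd] at hx; simp at hx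
        | cons y ys =>
          rw [hd] at hx
          have : y = x := by simpa using hx
          subst this
          have := pv_dropWhile_head _ _ _ _ hd
          simpa [Option.isNone_iff_eq_none, Option.isSome_iff_exists] using this
      · intro j
        rw [pvGetD_modify_fold, PySem.Dict.getD_insert]
        by_cases hjc : j = c
        · subst hjc; simp [hbd j]
        · simp [hjc, hbd j]

lemma pv_head_dropWhile (nc : Int) (l : List String) :
    ∀ x, (l.dropWhile (fun s => (pvMarkerB nc s).isNone)).head? = some x →
      (pvMarkerB nc x).isSome := by
  intro x hx
  cases hd : l.dropWhile (fun s => (pvMarkerB nc s).isNone) with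
  | nil => rw [hd] at hx; simp at hx
  | cons y ys =>
    rw [hd] at hx
    have hyx : y = x := by simpa using hx
    subst hyx
    have := pv_dropWhile_head _ _ _ _ hd
    simpa [Option.isNone_iff_eq_none, Option.isSome_iff_exists] using this

lemma pv_keep_dropWhile (nc : Int) (l0 : List String) :
    ∀ s ∈ (l0.filter (fun s => !(pvSkipCond s))).dropWhile (fun s => (pvMarkerB nc s).isNone),
      pvSkipCond s = false := by
  intro s hs
  have hmem : s ∈ l0.filter (fun s => !(pvSkipCond s)) := (List.dropWhile_sublist _).subset hs
  have := (List.mem_filter.mp hmem).2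
  simpa using this

lemma pvKey (content : String) (nc : Int) (i : Int) :
    (((PySem.Str.splitlines content).foldl (pvStepA nc)
        ((PySem.List.pyRange 0 nc 1).foldl (fun d j => d.insert j ([] : List String))
          PySem.Dict.empty, none)).1).getD i [] =
      (pvSegsB nc PySem.Dict.empty
        (pvSkipB nc (((PySem.Str.splitlines content).map PySem.Str.strip).filter
          (fun s => (PySem.Str.len s != 0) && !PySem.Str.startswith s "#")))).getD i [] := by
  have hstep : pvStepA nc = fun st y => pvStepStrippedA nc st (PySem.Str.strip y) := rfl
  have hfiltc : ((PySem.Str.splitlines content).map PySem.Str.strip).filter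
      (fun s => (PySem.Str.len s != 0) && !PySem.Str.startswith s "#") =
      ((PySem.Str.splitlines content).map PySem.Str.strip).filter (fun s => !(pvSkipCond s)) := by
    refine List.filter_congr ?_
    intro x _
    simp [pvSkipCond, Bool.not_or, bne]
  rw [hstep, ← List.foldl_map, hfiltc, pvSkip_eq_dropWhile,
    pvFold_filter nc ((PySem.Str.splitlines content).map PySem.Str.strip), pvFold_skip nc]
  refine pvMain nc _ _ Nat.le.refl (pv_keep_dropWhile nc _) (pv_head_dropWhile nc _) _ _ _ ?_ i
  intro j
  rw [pvInit_getD _ _ _ (by simp [PySem.Dict.getD_empty])]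
  simp [PySem.Dict.getD_empty]
-- ===== VERDICT (by name: the statement is the Claim_ definition above) =====
theorem split_paired_a3m_py_spec : Claim_equal_split_paired_a3m_py := by
  intro content nc _
  unfold Spec_split_paired_a3m_py split_paired_a3m_py split_paired_a3m_py_alt
  refine List.map_congr_left ?_
  intro i _
  rw [pvKey content nc i]
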